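-- pv_equiv track=rewrite | github.com/sergeisidorkin/ai_app | contacts_app/forms.py | _format_ru_local_number
-- ===== SOURCE A (Python) =====
-- def _format_ru_local_number(raw_value):
--     digits = "".join(char for char in str(raw_value or "") if char.isdigit())
--     if len(digits) >= 11 and digits[0] in {"7", "8"}:
--         digits = digits[1:]
--     if len(digits) > 10:
--         digits = digits[-10:]
--     if len(digits) <= 3:
--         return f"({digits}"
--     if len(digits) <= 6:
--         return f"({digits[:3]}) {digits[3:]}"
--     if len(digits) <= 8:
--         return f"({digits[:3]}) {digits[3:6]}-{digits[6:]}"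
--     return f"({digits[:3]}) {digits[3:6]}-{digits[6:8]}-{digits[8:10]}"
-- ===== SOURCE B (Python) =====
-- def _format_ru_local_number(raw_value):
--     digits = "".join(char for char in str(raw_value or "") if char.isdigit())
--     if len(digits) >= 11 and digits[0] in {"7", "8"}:
--         digits = digits[1:]
--     if len(digits) > 10:
--         digits = digits[-10:]
--     out = "("
--     i = 0
--     for size, sep in ((3, ""), (3, ") "), (2, "-"), (2, "-")):
--         chunk = digits[i:i + size]
--         if not chunk:
--             break
--         out += sep + chunk
--         i += size
--     return out
-- ===== Notes on version B (the rewrite author's own statement) =====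
-- stated objective: simpler
-- what changed: The four length-bucket return branches are replaced by a single table-driven loop over (chunk-size, separator) segments that appends a separator+chunk and breaks on the first empty chunk.
import Mathlib
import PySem

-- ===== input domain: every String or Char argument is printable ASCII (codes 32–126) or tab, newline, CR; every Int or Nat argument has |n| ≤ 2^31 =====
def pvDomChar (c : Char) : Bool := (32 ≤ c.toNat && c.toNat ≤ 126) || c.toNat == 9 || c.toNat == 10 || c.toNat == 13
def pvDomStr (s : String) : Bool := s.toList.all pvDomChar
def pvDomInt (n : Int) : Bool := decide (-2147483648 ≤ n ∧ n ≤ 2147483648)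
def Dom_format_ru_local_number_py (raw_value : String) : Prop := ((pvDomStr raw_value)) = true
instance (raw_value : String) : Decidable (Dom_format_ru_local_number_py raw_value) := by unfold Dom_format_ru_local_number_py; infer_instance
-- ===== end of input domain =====

-- B replaces A's four length-bucket return branches with a single table-driven loop over
-- (size, separator) segments; objective: simpler.

-- ===== PORT A =====
-- A-side helper: the four-branch cascade of A, over the normalized digit list.
def pvFmtA (d : List Char) : List Char :=
  if d.length ≤ 3 then '(' :: d
  else if d.length ≤ 6 then
    '(' :: PySem.List.slice d none (some 3) ++ ')' :: ' ' :: PySem.List.slice d (some 3) none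
  else if d.length ≤ 8 then
    '(' :: PySem.List.slice d none (some 3) ++ ')' :: ' ' :: PySem.List.slice d (some 3) (some 6)
      ++ '-' :: PySem.List.slice d (some 6) none
  else
    '(' :: PySem.List.slice d none (some 3) ++ ')' :: ' ' :: PySem.List.slice d (some 3) (some 6)
      ++ '-' :: PySem.List.slice d (some 6) (some 8) ++ '-' :: PySem.List.slice d (some 8) (some 10)

def format_ru_local_number_py (raw_value : String) : String :=
  let digits0 := raw_value.toList.filter PySem.Chars.isdigit
  let digits1 := if 11 ≤ digits0.length ∧ (digits0.headI = '7' ∨ digits0.headI = '8')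
    then PySem.List.slice digits0 (some 1) none else digits0
  let digits := if 10 < digits1.length
    then PySem.List.slice digits1 (some (-10)) none else digits1
  String.mk (pvFmtA digits)

-- ===== PORT B =====
-- B-side helper: the segment loop of Source B (size, separator), breaking on the first empty chunk.
def pvFmtBLoop (segs : List (Nat × List Char)) (d : List Char) (i : Nat) (out : List Char) :
    List Char :=
  match segs with
  | [] => out
  | (size, sep) :: rest =>
    let chunk := PySem.List.slice d (some (i : Int)) (some ((i : Int) + (size : Int)))
    if chunk = [] then out
    else pvFmtBLoop rest d (i + size) (out ++ sep ++ chunk)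

def format_ru_local_number_py_alt (raw_value : String) : String :=
  let digits0 := raw_value.toList.filter PySem.Chars.isdigit
  let digits1 := if 11 ≤ digits0.length ∧ (digits0.headI = '7' ∨ digits0.headI = '8')
    then PySem.List.slice digits0 (some 1) none else digits0
  let digits := if 10 < digits1.length
    then PySem.List.slice digits1 (some (-10)) none else digits1
  String.mk (pvFmtBLoop [(3, []), (3, [')', ' ']), (2, ['-']), (2, ['-'])] digits 0 ['('])

-- ===== PRECONDITION & SPEC =====
def Spec_format_ru_local_number_py (raw_value : String) (out : String) : Prop := out = format_ru_local_number_py_alt raw_value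
instance (raw_value : String) (out : String) : Decidable (Spec_format_ru_local_number_py raw_value out) := by unfold Spec_format_ru_local_number_py; infer_instance

-- ===== CLAIM (what is proved, stated in full; the proofs are below) =====
def Claim_equal_format_ru_local_number_py : Prop := ∀ (raw_value : String), Dom_format_ru_local_number_py raw_value → Spec_format_ru_local_number_py raw_value (format_ru_local_number_py raw_value)

-- ===== LEMMAS AND PROOFS =====

-- The two formatters agree on every digit list of length ≤ 10 (the normalized form).
theorem pvFmt_eq (d : List Char) (h : d.length ≤ 10) : pvFmtA d = pvFmtBLoop [(3, []), (3, [')', ' ']), (2, ['-']), (2, ['-'])] d 0 ['('] := by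
  rcases d with _ | ⟨a, _ | ⟨b, _ | ⟨c, _ | ⟨e, _ | ⟨f, _ | ⟨g, _ | ⟨x, _ | ⟨y, _ | ⟨z, _ | ⟨w, d⟩⟩⟩⟩⟩⟩⟩⟩⟩⟩
  case cons.cons.cons.cons.cons.cons.cons.cons.cons.cons =>
    simp only [List.length_cons] at h
    obtain rfl : d = [] := List.length_eq_zero_iff.mp (by omega)
    simp [pvFmtA, pvFmtBLoop, PySem.List.slice, PySem.List.clampIdx]
  all_goals simp [pvFmtA, pvFmtBLoop, PySem.List.slice, PySem.List.clampIdx]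

theorem pv_len_norm (d : List Char) :
    (if 10 < d.length then PySem.List.slice d (some (-10)) none else d).length ≤ 10 := by
  split_ifs with h
  · rw [PySem.List.slice_from_neg_ofNat d 10 (by omega)]
    simp
    omega
  · omega

-- ===== VERDICT (by name: the statement is the Claim_ definition above) =====
theorem format_ru_local_number_py_spec : Claim_equal_format_ru_local_number_py := by
  intro raw _
  unfold Spec_format_ru_local_number_py format_ru_local_number_py format_ru_local_number_py_alt
  exact congrArg String.mk (pvFmt_eq _ (pv_len_norm _))
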